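-- pv_equiv track=rewrite | github.com/gh0stintheshe11/LeetCode-Solutions | solutions/3101.maximum-coins-heroes-can-collect/Python3.py | maximumCoins
-- ===== SOURCE A (Python) =====
-- from typing import List
-- from itertools import accumulate
-- import bisect
--
-- def maximumCoins(heroes: List[int], monsters: List[int], coins: List[int]) -> List[int]:
--     m_pairs = list(zip(monsters, coins))
--     m_pairs.sort()
--
--     sorted_monsters, sorted_coins = zip(*m_pairs)
--
--     coin_prefix_sum = list(accumulate(sorted_coins))
--
--     result = []
--     for hero in heroes:
--         pos = bisect.bisect_right(sorted_monsters, hero)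
--         if pos > 0:
--             result.append(coin_prefix_sum[pos - 1])
--         else:
--             result.append(0)
--
--     return result
-- ===== SOURCE B (Python) =====
-- def maximumCoins(heroes, monsters, coins):
--     return [sum(c for m, c in zip(monsters, coins) if m <= h) for h in heroes]
-- ===== Notes on version B (the rewrite author's own statement) =====
-- stated objective: simpler
-- what changed: Replaces the sort + prefix-sum array + per-hero binary search with a one-line direct summation: each hero's answer is the sum of coins of monsters with value <= hero, computed by a single filtered pass over zip(monsters, coins).
import Mathlib
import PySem

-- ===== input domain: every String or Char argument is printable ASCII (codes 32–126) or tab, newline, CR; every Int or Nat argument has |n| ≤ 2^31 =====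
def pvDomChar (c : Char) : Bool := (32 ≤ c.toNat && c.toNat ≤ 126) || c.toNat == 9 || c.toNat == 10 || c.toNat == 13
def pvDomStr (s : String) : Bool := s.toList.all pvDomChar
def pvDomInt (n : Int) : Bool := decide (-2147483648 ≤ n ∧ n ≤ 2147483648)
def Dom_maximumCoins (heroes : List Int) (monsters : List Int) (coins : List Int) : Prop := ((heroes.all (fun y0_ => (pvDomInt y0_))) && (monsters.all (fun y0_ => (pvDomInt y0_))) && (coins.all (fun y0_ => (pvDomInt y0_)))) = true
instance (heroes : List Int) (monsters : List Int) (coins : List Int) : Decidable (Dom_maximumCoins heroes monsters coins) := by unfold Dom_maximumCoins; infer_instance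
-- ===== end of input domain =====

-- B replaces A's sort + prefix sums + per-hero binary search by a direct filtered
-- summation over zip(monsters, coins) for each hero (simpler, not faster).

-- ===== PORT A =====

-- port of itertools.accumulate on a list of ints (running sums, same length)
def pyAccumulate (s : Int) : List Int → List Int
  | [] => []
  | c :: cs => (s + c) :: pyAccumulate (s + c) cs

def maximumCoins (heroes : List Int) (monsters : List Int) (coins : List Int) : List Int :=
  -- m_pairs = list(zip(monsters, coins)); m_pairs.sort()  (lexicographic tuple sort)
  let m_pairs := PySem.List.sorted2 (List.zip monsters coins) Prod.fst Prod.snd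
  -- sorted_monsters, sorted_coins = zip(*m_pairs)  (raises on empty m_pairs; excluded by Pre_)
  let sorted_monsters := m_pairs.map Prod.fst
  let sorted_coins := m_pairs.map Prod.snd
  let coin_prefix_sum := pyAccumulate 0 sorted_coins
  heroes.foldl (fun result hero =>
    let pos := PySem.List.bisectRight sorted_monsters hero
    if pos > 0 then
      -- index pos-1 is in range: 0 < pos ≤ len(coin_prefix_sum), so pyGetD's default is never used
      result ++ [PySem.List.pyGetD coin_prefix_sum ((pos : Int) - 1) 0]
    else
      result ++ [0]) []

-- ===== PORT B =====

def maximumCoins_alt (heroes : List Int) (monsters : List Int) (coins : List Int) : List Int :=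
  heroes.map (fun h =>
    (((List.zip monsters coins).filter (fun mc => decide (mc.1 ≤ h))).map (fun mc => mc.2)).sum)

-- ===== PRECONDITION & SPEC =====

-- Pre_ excludes empty monsters/coins, where zip(*m_pairs) in A raises ValueError.
def Pre_maximumCoins (heroes : List Int) (monsters : List Int) (coins : List Int) : Prop :=
  monsters ≠ [] ∧ coins ≠ []
instance (heroes : List Int) (monsters : List Int) (coins : List Int) : Decidable (Pre_maximumCoins heroes monsters coins) := by unfold Pre_maximumCoins; infer_instance

def pvWitness_maximumCoins : List Int × List Int × List Int := ([3, 1], [2, 4], [5, 7])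

def Spec_maximumCoins (heroes : List Int) (monsters : List Int) (coins : List Int) (out : List Int) : Prop := out = maximumCoins_alt heroes monsters coins
instance (heroes : List Int) (monsters : List Int) (coins : List Int) (out : List Int) : Decidable (Spec_maximumCoins heroes monsters coins out) := by unfold Spec_maximumCoins; infer_instance

-- ===== CLAIM (what is proved, stated in full; the proofs are below) =====
def Claim_equal_maximumCoins : Prop := ∀ (heroes : List Int) (monsters : List Int) (coins : List Int), Dom_maximumCoins heroes monsters coins → Pre_maximumCoins heroes monsters coins → Spec_maximumCoins heroes monsters coins (maximumCoins heroes monsters coins)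

-- ===== LEMMAS AND PROOFS =====

-- the (non-strict) lexicographic order that PySem.List.sorted2 with keys fst, snd leaves the list in
def lexle (a b : Int × Int) : Prop := a.1 < b.1 ∨ (a.1 = b.1 ∧ a.2 ≤ b.2)

lemma insertBy_lex_pairwise (x : Int × Int) (acc : List (Int × Int))
    (h : acc.Pairwise lexle) :
    (PySem.List.insertBy
      (fun a b => decide (a.1 < b.1) || !decide (b.1 < a.1) && decide (a.2 < b.2)) x acc).Pairwise lexle := by
  induction acc with
  | nil => simp [PySem.List.insertBy, lexle]
  | cons y ys ih =>
    rw [List.pairwise_cons] at h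
    obtain ⟨hy, hys⟩ := h
    by_cases hc : (decide (x.1 < y.1) || !decide (y.1 < x.1) && decide (x.2 < y.2)) = true
    · rw [show PySem.List.insertBy
          (fun a b => decide (a.1 < b.1) || !decide (b.1 < a.1) && decide (a.2 < b.2)) x (y :: ys)
          = x :: y :: ys from by simp [PySem.List.insertBy, hc]]
      simp only [Bool.or_eq_true, Bool.and_eq_true, Bool.not_eq_eq_eq_not, Bool.not_true,
        decide_eq_true_eq, decide_eq_false_iff_not] at hc
      refine List.pairwise_cons.mpr ⟨?_, List.pairwise_cons.mpr ⟨hy, hys⟩⟩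
      intro z hz
      rcases List.mem_cons.mp hz with rfl | hz'
      · unfold lexle
        rcases hc with h1 | ⟨h1, h2⟩ <;> omega
      · have hyz := hy z hz'
        unfold lexle at hyz ⊢
        rcases hc with h1 | ⟨h1, h2⟩ <;> rcases hyz with h3 | ⟨h3, h4⟩ <;> omega
    · rw [show PySem.List.insertBy
          (fun a b => decide (a.1 < b.1) || !decide (b.1 < a.1) && decide (a.2 < b.2)) x (y :: ys)
          = y :: PySem.List.insertBy
              (fun a b => decide (a.1 < b.1) || !decide (b.1 < a.1) && decide (a.2 < b.2)) x ys
          from by simp [PySem.List.insertBy, hc]]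
      simp only [Bool.or_eq_true, Bool.and_eq_true, Bool.not_eq_eq_eq_not, Bool.not_true,
        decide_eq_true_eq, decide_eq_false_iff_not, not_or, not_and] at hc
      refine List.pairwise_cons.mpr ⟨?_, ih hys⟩
      intro z hz
      rcases (PySem.List.mem_insertBy _ _ _ _).mp hz with rfl | hz'
      · obtain ⟨h1, h2⟩ := hc
        unfold lexle
        by_cases he : y.1 < z.1
        · exact Or.inl he
        · have := h2 he; omega
      · exact hy z hz'

lemma sorted2_zip_pairwise (xs : List (Int × Int)) :
    (PySem.List.sorted2 xs Prod.fst Prod.snd).Pairwise lexle := by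
  rw [show PySem.List.sorted2 xs Prod.fst Prod.snd = xs.foldl
      (fun acc x => PySem.List.insertBy
        (fun a b => decide (a.1 < b.1) || !decide (b.1 < a.1) && decide (a.2 < b.2)) x acc) [] from rfl]
  have : ∀ (l : List (Int × Int)) (acc : List (Int × Int)), acc.Pairwise lexle →
      (l.foldl (fun acc x => PySem.List.insertBy
        (fun a b => decide (a.1 < b.1) || !decide (b.1 < a.1) && decide (a.2 < b.2)) x acc) acc).Pairwise lexle := by
    intro l
    induction l with
    | nil => intro acc h; exact h
    | cons x t ih => intro acc h; exact ih _ (insertBy_lex_pairwise x acc h)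
  exact this xs [] (List.Pairwise.nil)

lemma length_pyAccumulate (s : Int) (xs : List Int) : (pyAccumulate s xs).length = xs.length := by
  induction xs generalizing s with
  | nil => rfl
  | cons c cs ih => simp [pyAccumulate, ih]

lemma pyAccumulate_getElem (s : Int) (xs : List Int) (k : Nat) (hk : k < xs.length) :
    (pyAccumulate s xs)[k]'(by rw [length_pyAccumulate]; exact hk) = s + (xs.take (k + 1)).sum := by
  induction xs generalizing s k with
  | nil => simp at hk
  | cons c cs ih =>
    cases k with
    | zero => simp [pyAccumulate]
    | succ k' =>
      simp only [pyAccumulate, List.getElem_cons_succ, List.take_succ_cons, List.sum_cons]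
      rw [ih (s + c) k' (by simpa using hk)]
      ring

lemma filter_eq_take {α : Type} (P : α → Bool) (xs : List α) (pos : Nat)
    (h1 : ∀ (j : Nat) (hj : j < xs.length), j < pos → P xs[j])
    (h2 : ∀ (j : Nat) (hj : j < xs.length), pos ≤ j → ¬ P xs[j]) :
    xs.filter P = xs.take pos := by
  induction xs generalizing pos with
  | nil => simp
  | cons x t ih =>
    cases pos with
    | zero =>
      have hx : ¬ P x := h2 0 (by simp) (Nat.zero_le _)
      simp only [List.take_zero]
      rw [List.filter_cons_of_neg (by simpa using hx)]
      rw [List.filter_eq_nil_iff]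
      intro a ha
      obtain ⟨j, hj, rfl⟩ := List.getElem_of_mem ha
      exact h2 (j + 1) (by simpa using Nat.succ_lt_succ hj) (Nat.zero_le _)
    | succ p =>
      have hx : P x := h1 0 (by simp) (Nat.succ_pos _)
      rw [List.filter_cons_of_pos hx, List.take_succ_cons]
      congr 1
      exact ih p
        (fun j hj hjp => h1 (j + 1) (by simpa using Nat.succ_lt_succ hj) (Nat.succ_lt_succ hjp))
        (fun j hj hjp => h2 (j + 1) (by simpa using Nat.succ_lt_succ hj) (Nat.succ_le_succ hjp))

-- the per-hero value A computes equals B's direct filtered sum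
lemma perHero (monsters coins : List Int) (h : Int) :
    (if PySem.List.bisectRight ((PySem.List.sorted2 (List.zip monsters coins) Prod.fst Prod.snd).map Prod.fst) h > 0
     then PySem.List.pyGetD
            (pyAccumulate 0 ((PySem.List.sorted2 (List.zip monsters coins) Prod.fst Prod.snd).map Prod.snd))
            ((PySem.List.bisectRight ((PySem.List.sorted2 (List.zip monsters coins) Prod.fst Prod.snd).map Prod.fst) h : Int) - 1) 0
     else 0)
    = (((List.zip monsters coins).filter (fun mc => decide (mc.1 ≤ h))).map (fun mc => mc.2)).sum := by
  set sp := PySem.List.sorted2 (List.zip monsters coins) Prod.fst Prod.snd with hsp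
  have hperm : sp.Perm (List.zip monsters coins) := PySem.List.sorted2_perm _ _ _ _
  have hpw : (sp.map Prod.fst).Pairwise (· ≤ ·) := by
    refine List.Pairwise.map _ ?_ (sorted2_zip_pairwise (List.zip monsters coins))
    intro a b hab
    rcases hab with h1 | ⟨h1, _⟩
    · exact le_of_lt h1
    · exact le_of_eq h1
  set pos := PySem.List.bisectRight (sp.map Prod.fst) h with hpos
  obtain ⟨hle, hlt, hgt⟩ := PySem.List.bisectRight_spec (sp.map Prod.fst) h hpw
  have hlen : (sp.map Prod.fst).length = sp.length := List.length_map ..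
  have hft : sp.filter (fun mc => decide (mc.1 ≤ h)) = sp.take pos := by
    apply filter_eq_take
    · intro j hj hjp
      have := hlt j (by rw [hlen]; exact hj) hjp
      simpa using this
    · intro j hj hjp
      have := hgt j (by rw [hlen]; exact hj) hjp
      simp only [List.getElem_map] at this
      simp
      omega
  have hsum : ((sp.take pos).map (fun mc : Int × Int => mc.2)).sum
      = (((List.zip monsters coins).filter (fun mc => decide (mc.1 ≤ h))).map (fun mc => mc.2)).sum := by
    rw [← hft]
    exact List.Perm.sum_eq (List.Perm.map _ (List.Perm.filter _ hperm))
  by_cases hp : pos > 0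
  · rw [if_pos hp]
    have hple : pos ≤ sp.length := by rw [← hlen]; exact hle
    have hcast : ((pos : Int) - 1) = ((pos - 1 : Nat) : Int) := by omega
    have hlt' : pos - 1 < (pyAccumulate 0 (sp.map Prod.snd)).length := by
      rw [length_pyAccumulate, List.length_map]; omega
    rw [hcast, PySem.List.pyGetD_natCast]
    rw [List.getD_eq_getElem _ _ hlt']
    rw [pyAccumulate_getElem 0 (sp.map Prod.snd) (pos - 1) (by rw [List.length_map]; omega)]
    rw [show pos - 1 + 1 = pos from by omega]
    rw [← List.map_take, zero_add]
    exact hsum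
  · rw [if_neg hp]
    have hpos0 : pos = 0 := by omega
    rw [hpos0] at hsum
    simpa using hsum

-- ===== VERDICT (by name: the statement is the Claim_ definition above) =====
theorem maximumCoins_spec : Claim_equal_maximumCoins := by
  intro heroes monsters coins _ _
  show maximumCoins heroes monsters coins = maximumCoins_alt heroes monsters coins
  unfold maximumCoins maximumCoins_alt
  simp only []
  have hfun : (fun (result : List Int) (hero : Int) =>
      let pos := PySem.List.bisectRight
        ((PySem.List.sorted2 (List.zip monsters coins) Prod.fst Prod.snd).map Prod.fst) hero
      if pos > 0 then
        result ++ [PySem.List.pyGetD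
          (pyAccumulate 0 ((PySem.List.sorted2 (List.zip monsters coins) Prod.fst Prod.snd).map Prod.snd))
          ((pos : Int) - 1) 0]
      else result ++ [0])
      = (fun (result : List Int) (hero : Int) =>
        result ++ [(((List.zip monsters coins).filter (fun mc => decide (mc.1 ≤ hero))).map (fun mc => mc.2)).sum]) := by
    funext result hero
    have hph := perHero monsters coins hero
    rw [← hph]
    by_cases hc : PySem.List.bisectRight
        ((PySem.List.sorted2 (List.zip monsters coins) Prod.fst Prod.snd).map Prod.fst) hero > 0 <;>
      simp only [hc, if_pos, if_neg, not_false_iff]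
  rw [hfun, PySem.List.foldl_append_singleton_eq_map]
  simp
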